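-- pv_equiv track=rewrite | github.com/pypi-data/pypi-mirror-400 | packages/relace-mcp/relace_mcp-0.2.3-py3-none-any.whl/relace_mcp/tools/apply/snippet.py | anchor_precheck
-- ===== SOURCE A (Python) =====
-- _REMOVE_DIRECTIVE_PATTERNS = ("// remove ", "# remove ")
--
-- def anchor_precheck(concrete_lines_list: list[str], initial_code: str) -> bool:
--     """Check if concrete lines have sufficient anchors to locate in initial_code.
--
--     Uses loose matching (after strip()) to avoid false negatives from indentation/whitespace differences.
--     Filters out short lines (like }, return) to avoid false positives.
--
--     Args:
--         concrete_lines_list: Non-placeholder lines.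
--         initial_code: Original file content.
--
--     Returns:
--         True if at least 2 valid anchors are found, False otherwise.
--     """
--     if not concrete_lines_list:
--         return False
--
--     # Filter out pure directive lines (like "// remove BlockName")
--     # These should not be used for anchor positioning
--     anchor_lines = [
--         line
--         for line in concrete_lines_list
--         if not any(line.strip().startswith(pat) for pat in _REMOVE_DIRECTIVE_PATTERNS)
--     ]
--
--     if not anchor_lines:
--         # Only directives, no real anchors
--         return False
--
--     # Count valid anchor hits
--     MIN_ANCHOR_LENGTH = (
--         10  # Minimum valid anchor length (avoid false positives from }, return, etc.)
--     )
--     MIN_ANCHOR_HITS = 2  # Minimum number of anchor hits required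
--
--     hit_count = 0
--     for line in anchor_lines:
--         stripped = line.strip()
--         # Only count sufficiently long lines to avoid false positives from }, return, pass, etc.
--         if len(stripped) >= MIN_ANCHOR_LENGTH and stripped in initial_code:
--             hit_count += 1
--             if hit_count >= MIN_ANCHOR_HITS:
--                 return True
--
--     # If only one valid anchor but it's sufficiently unique (length >= 20), accept it
--     if hit_count == 1:
--         for line in anchor_lines:
--             stripped = line.strip()
--             if len(stripped) >= 20 and stripped in initial_code:
--                 return True
--
--     return False
-- ===== SOURCE B (Python) =====
-- _REMOVE_DIRECTIVE_PATTERNS = ("// remove ", "# remove ")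
--
--
-- def anchor_precheck(concrete_lines_list, initial_code):
--     """Weighted scoring in one pass: a matching anchor of length >= 20 is worth 2
--     points, any other matching anchor (length >= 10) 1 point; accept iff the
--     total score reaches 2. This is correct because A accepts exactly when there
--     are two hits, or one hit that is long (the fallback re-scan can only find
--     the single hit itself)."""
--     score = 0
--     for line in concrete_lines_list:
--         stripped = line.strip()
--         if any(stripped.startswith(pat) for pat in _REMOVE_DIRECTIVE_PATTERNS):
--             continue
--         if len(stripped) >= 10 and stripped in initial_code:
--             score += 2 if len(stripped) >= 20 else 1
--     return score >= 2
-- ===== Notes on version B (the rewrite author's own statement) =====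
-- stated objective: alternative
-- what changed: Replaces A's early-exit hit-counting loop plus its separate one-hit length-20 fallback re-scan with a single weighted-scoring pass (long matching anchor = 2 points, normal = 1) and one threshold test score >= 2; correct because A accepts exactly when there are two hits or one long hit, and the fallback can only ever find the single hit itself.
import Mathlib
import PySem

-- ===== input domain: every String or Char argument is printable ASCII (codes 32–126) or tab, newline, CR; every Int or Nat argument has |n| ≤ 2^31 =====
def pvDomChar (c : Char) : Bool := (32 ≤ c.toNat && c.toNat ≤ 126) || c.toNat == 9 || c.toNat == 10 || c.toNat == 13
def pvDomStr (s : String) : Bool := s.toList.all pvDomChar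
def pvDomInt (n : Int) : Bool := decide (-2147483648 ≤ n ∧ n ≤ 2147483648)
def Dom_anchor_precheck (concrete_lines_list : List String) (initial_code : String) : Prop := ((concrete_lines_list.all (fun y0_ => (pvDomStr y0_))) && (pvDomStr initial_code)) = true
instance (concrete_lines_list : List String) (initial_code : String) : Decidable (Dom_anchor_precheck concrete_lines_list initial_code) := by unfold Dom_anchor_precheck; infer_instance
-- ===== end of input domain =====

-- B replaces A's early-exit counting loop plus its separate one-hit fallback re-scan with a single
-- weighted-scoring pass (long hit = 2 points, normal hit = 1) and one threshold test (alternative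
-- decomposition, same cost).

-- shared module constant _REMOVE_DIRECTIVE_PATTERNS
def pvPatterns : List String := ["// remove ", "# remove "]

-- any(s.startswith(pat) for pat in _REMOVE_DIRECTIVE_PATTERNS)
def pvDir (s : String) : Bool := pvPatterns.any (fun pat => PySem.Str.startswith s pat)

-- len(s) >= MIN_ANCHOR_LENGTH and s in initial_code
def pvP (code s : String) : Bool := decide (10 ≤ PySem.Str.len s) && PySem.Str.isIn s code

-- len(s) >= 20 and s in initial_code
def pvQ (code s : String) : Bool := decide (20 ≤ PySem.Str.len s) && PySem.Str.isIn s code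

-- ===== PORT A =====
-- A's counting loop with early exit: none = early `return True` (hit_count reached 2),
-- some c = loop finished with hit_count c
def pvHitLoop (code : String) : List String → Nat → Option Nat
  | [], c => some c
  | l :: ls, c =>
      if pvP code (PySem.Str.strip l) then
        if 2 ≤ c + 1 then none else pvHitLoop code ls (c + 1)
      else pvHitLoop code ls c

def anchor_precheck (concrete_lines_list : List String) (initial_code : String) : Bool :=
  if concrete_lines_list = [] then false
  else
    let anchor_lines := concrete_lines_list.filter (fun line => !pvDir (PySem.Str.strip line))
    if anchor_lines = [] then false
    else
      match pvHitLoop initial_code anchor_lines 0 with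
      | none => true
      | some hit_count =>
          if hit_count = 1 then
            anchor_lines.any (fun line => pvQ initial_code (PySem.Str.strip line))
          else false

-- ===== PORT B =====
-- B's single scoring loop: skip directives, add 2 for a long (>= 20) matching anchor,
-- 1 for a normal (>= 10) matching anchor; accept iff the score reaches 2.
def anchor_precheck_alt (concrete_lines_list : List String) (initial_code : String) : Bool :=
  let score := concrete_lines_list.foldl (fun sc line =>
      if pvDir (PySem.Str.strip line) then sc
      else if pvP initial_code (PySem.Str.strip line) then
        sc + (if 20 ≤ PySem.Str.len (PySem.Str.strip line) then 2 else 1)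
      else sc) 0
  decide (2 ≤ score)

-- ===== PRECONDITION & SPEC =====
def Spec_anchor_precheck (concrete_lines_list : List String) (initial_code : String) (out : Bool) : Prop := out = anchor_precheck_alt concrete_lines_list initial_code
instance (concrete_lines_list : List String) (initial_code : String) (out : Bool) : Decidable (Spec_anchor_precheck concrete_lines_list initial_code out) := by unfold Spec_anchor_precheck; infer_instance

-- ===== CLAIM (what is proved, stated in full; the proofs are below) =====
def Claim_equal_anchor_precheck : Prop := ∀ (concrete_lines_list : List String) (initial_code : String), Dom_anchor_precheck concrete_lines_list initial_code → Spec_anchor_precheck concrete_lines_list initial_code (anchor_precheck concrete_lines_list initial_code)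

-- ===== LEMMAS AND PROOFS =====

theorem pvP_of_Q {code s : String} (h : pvQ code s = true) : pvP code s = true := by
  simp only [pvQ, pvP, Bool.and_eq_true, decide_eq_true_eq, PySem.Str.len_eq] at *
  exact ⟨by omega, h.2⟩

-- A's counting loop, characterised by countP
theorem pvHitLoop_spec (code : String) (ls : List String) (c : Nat) (hc : c ≤ 1) :
    pvHitLoop code ls c =
      if 2 ≤ c + ls.countP (fun l => pvP code (PySem.Str.strip l)) then none
      else some (c + ls.countP (fun l => pvP code (PySem.Str.strip l))) := by
  induction ls generalizing c with
  | nil =>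
      rw [pvHitLoop, List.countP_nil, if_neg (by omega)]
      simp
  | cons l ls ih =>
      rw [pvHitLoop]
      by_cases h : pvP code (PySem.Str.strip l) = true
      · rw [if_pos h]
        have hcnt : (l :: ls).countP (fun l => pvP code (PySem.Str.strip l))
            = ls.countP (fun l => pvP code (PySem.Str.strip l)) + 1 := by
          rw [List.countP_cons]; simp [h]
        rw [hcnt]
        rcases Nat.lt_or_ge c 1 with hc0 | hc1
        · have : c = 0 := by omega
          subst this
          rw [if_neg (show ¬ 2 ≤ 0 + 1 by omega), ih 1 (by omega)]
          have e : 0 + (ls.countP (fun l => pvP code (PySem.Str.strip l)) + 1)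
              = 1 + ls.countP (fun l => pvP code (PySem.Str.strip l)) := by omega
          rw [e]
        · have : c = 1 := by omega
          subst this
          rw [if_pos (show 2 ≤ 1 + 1 by omega),
            if_pos (show 2 ≤ 1 + (ls.countP (fun l => pvP code (PySem.Str.strip l)) + 1) by omega)]
      · rw [if_neg h]
        have hcnt : (l :: ls).countP (fun l => pvP code (PySem.Str.strip l))
            = ls.countP (fun l => pvP code (PySem.Str.strip l)) := by
          rw [List.countP_cons]; simp [h]
        rw [hcnt]
        exact ih c hc

-- the one-hit fallback re-scan: with exactly one valid anchor l₀, the scan is l₀'s length-20 test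
theorem pvFallback (code : String) (ls : List String) (l₀ : String)
    (h : ls.filter (fun l => pvP code (PySem.Str.strip l)) = [l₀]) :
    ls.any (fun l => pvQ code (PySem.Str.strip l))
      = decide (20 ≤ PySem.Str.len (PySem.Str.strip l₀)) := by
  induction ls with
  | nil => simp at h
  | cons l ls ih =>
      rw [List.filter_cons] at h
      by_cases hp : pvP code (PySem.Str.strip l) = true
      · rw [if_pos hp] at h
        obtain ⟨hl, hrest⟩ := List.cons_eq_cons.mp h
        subst hl
        have hnone : ls.any (fun l => pvQ code (PySem.Str.strip l)) = false := by
          rw [List.any_eq_false]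
          intro x hx
          have := List.filter_eq_nil_iff.mp hrest x hx
          intro hq
          exact this (pvP_of_Q hq)
        rw [List.any_cons, hnone, Bool.or_false]
        have hin : PySem.Str.isIn (PySem.Str.strip l) code = true := by
          simp only [pvP, Bool.and_eq_true] at hp; exact hp.2
        simp only [pvQ, hin, Bool.and_true]
      · rw [if_neg hp] at h
        have hq : pvQ code (PySem.Str.strip l) = false := by
          cases hq' : pvQ code (PySem.Str.strip l)
          · rfl
          · exact absurd (pvP_of_Q hq') hp
        rw [List.any_cons, hq, Bool.false_or]
        exact ih h

-- B's scoring loop equals the weight-sum over the filtered hit list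
theorem pvScoreFold (code : String) (ls : List String) (c : Nat) :
    ls.foldl (fun sc line =>
        if pvDir (PySem.Str.strip line) then sc
        else if pvP code (PySem.Str.strip line) then
          sc + (if 20 ≤ PySem.Str.len (PySem.Str.strip line) then 2 else 1)
        else sc) c
      = c + ((ls.filter (fun l => !pvDir (PySem.Str.strip l) && pvP code (PySem.Str.strip l))).map
          (fun l => if 20 ≤ PySem.Str.len (PySem.Str.strip l) then 2 else 1)).sum := by
  induction ls generalizing c with
  | nil => simp
  | cons l ls ih =>
      rw [List.foldl_cons, List.filter_cons]
      by_cases hd : pvDir (PySem.Str.strip l) = true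
      · rw [if_pos hd,
          if_neg (show ¬ ((!pvDir (PySem.Str.strip l) && pvP code (PySem.Str.strip l)) = true) by
            simp [hd])]
        exact ih c
      · rw [if_neg hd]
        by_cases hp : pvP code (PySem.Str.strip l) = true
        · rw [if_pos hp,
            if_pos (show (!pvDir (PySem.Str.strip l) && pvP code (PySem.Str.strip l)) = true by
              simp [hd, hp]),
            List.map_cons, List.sum_cons, ih]
          omega
        · rw [if_neg hp,
            if_neg (show ¬ ((!pvDir (PySem.Str.strip l) && pvP code (PySem.Str.strip l)) = true) by
              simp [hp])]
          exact ih c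

-- each hit weighs at least 1
theorem pvLen_le_sum (ls : List String) :
    ls.length ≤ (ls.map (fun l => if 20 ≤ PySem.Str.len (PySem.Str.strip l) then 2 else 1)).sum := by
  induction ls with
  | nil => simp
  | cons l ls ih =>
      simp only [List.map_cons, List.sum_cons, List.length_cons]
      split_ifs <;> omega

theorem pvMain (lines : List String) (code : String) :
    anchor_precheck lines code = anchor_precheck_alt lines code := by
  unfold anchor_precheck anchor_precheck_alt
  rw [pvScoreFold, Nat.zero_add]
  have hm2 : (lines.filter (fun line => !pvDir (PySem.Str.strip line))).filter
        (fun l => pvP code (PySem.Str.strip l))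
      = lines.filter (fun l => !pvDir (PySem.Str.strip l) && pvP code (PySem.Str.strip l)) := by
    rw [List.filter_filter]
    exact List.filter_congr (fun a _ => by rw [Bool.and_comm])
  rw [← hm2]
  set hits := (lines.filter (fun line => !pvDir (PySem.Str.strip line))).filter
      (fun l => pvP code (PySem.Str.strip l)) with hhits
  by_cases h0 : lines = []
  · subst h0; simp [hhits]
  · rw [if_neg h0]
    by_cases h1 : lines.filter (fun line => !pvDir (PySem.Str.strip line)) = []
    · rw [if_pos h1]
      have : hits = [] := by rw [hhits, h1]; simp
      rw [this]; simp
    · rw [if_neg h1, pvHitLoop_spec code _ 0 (by omega), List.countP_eq_length_filter]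
      simp only [Nat.zero_add, ← hhits]
      by_cases h2 : 2 ≤ hits.length
      · rw [if_pos h2]
        have := pvLen_le_sum hits
        symm
        simp only [decide_eq_true_eq]
        omega
      · rw [if_neg h2]
        rcases Nat.lt_or_ge hits.length 1 with hl0 | hl1
        · have hm0 : hits = [] := List.length_eq_zero_iff.mp (by omega)
          rw [hm0]
          simp
        · have hml : hits.length = 1 := by omega
          obtain ⟨l₀, hl₀⟩ := List.length_eq_one_iff.mp hml
          rw [hml]
          have hred : (match some (1 : Nat) with
              | none => true
              | some hit_count =>
                  if hit_count = 1 then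
                    (lines.filter (fun line => !pvDir (PySem.Str.strip line))).any
                      (fun line => pvQ code (PySem.Str.strip line))
                  else false)
            = (lines.filter (fun line => !pvDir (PySem.Str.strip line))).any
                (fun line => pvQ code (PySem.Str.strip line)) := rfl
          rw [hred, pvFallback code _ l₀ (hhits ▸ hl₀), hl₀]
          simp only [List.map_cons, List.map_nil, List.sum_cons, List.sum_nil]
          by_cases h20 : 20 ≤ PySem.Str.len (PySem.Str.strip l₀)
          · simp only [if_pos h20, decide_eq_true h20]
            norm_num
          · simp only [if_neg h20, decide_eq_false h20]
            norm_num

-- ===== VERDICT (by name: the statement is the Claim_ definition above) =====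
theorem anchor_precheck_spec : Claim_equal_anchor_precheck := by
  intro lines code _
  unfold Spec_anchor_precheck
  exact pvMain lines code
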